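-- pv_equiv track=rewrite | github.com/jakraska/adventOfCode2019 | days/day04/day04.py | is_valid_group
-- ===== SOURCE A (Python) =====
-- from typing import List
--
-- def is_valid_group(num:List[int]):
--     dupe_num = num[0]
--     dupe_count = 1
--
--     for i in range(1, len(num)):
--         if num[i] == dupe_num:
--             dupe_count += 1
--         elif dupe_count == 2:
--             return True
--         else:
--             dupe_count = 1
--             dupe_num = num[i]
--
--     return dupe_count == 2
-- ===== SOURCE B (Python) =====
-- from typing import List
--
-- def is_valid_group(num: List[int]):
--     # Pad with None sentinels and look for the local pattern a,b,b,c with a != b != c: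
--     # a run of exactly two is exactly a consecutive quadruple a,b,b,c in the padded
--     # list with a != b, middle pair equal, b != c.  No run counting is performed.
--     pad = [None] + num + [None]
--     for a, b, c, d in zip(pad, pad[1:], pad[2:], pad[3:]):
--         if a != b and b == c and c != d:
--             return True
--     return False
-- ===== Notes on version B (the rewrite author's own statement) =====
-- stated objective: alternative
-- what changed: B does no run counting at all: it pads the list with sentinels and searches for the local 4-window pattern a,b,b,c with a != b and b != c, instead of A's scan that maintains a running duplicate count and current-digit sentinel.
-- outside the precondition, e.g. on is_valid_group([]): A raises IndexError, B returns False
import Mathlib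
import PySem

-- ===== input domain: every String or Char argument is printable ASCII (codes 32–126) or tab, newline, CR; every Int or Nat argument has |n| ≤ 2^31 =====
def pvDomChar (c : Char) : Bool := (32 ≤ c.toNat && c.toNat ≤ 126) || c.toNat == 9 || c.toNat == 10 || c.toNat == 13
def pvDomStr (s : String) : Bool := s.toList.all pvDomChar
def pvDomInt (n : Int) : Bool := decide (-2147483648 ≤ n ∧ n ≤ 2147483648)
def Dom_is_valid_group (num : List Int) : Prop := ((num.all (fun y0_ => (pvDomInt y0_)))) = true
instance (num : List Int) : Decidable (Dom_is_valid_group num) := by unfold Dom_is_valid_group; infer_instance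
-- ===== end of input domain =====

-- B replaces A's running-count scan by a sentinel-padded local 4-window pattern search; return value only, neither version mutates its argument.
-- ===== PORT A =====
-- the for-loop of A, as structural recursion over the remaining digits with state (dupe_num, dupe_count)
def isValidGroupLoop (dn dc : Int) : List Int → Bool
  | [] => decide (dc = 2)   -- 'return dupe_count == 2'
  | y :: ys =>
    if y = dn then isValidGroupLoop dn (dc + 1) ys
    else if dc = 2 then true
    else isValidGroupLoop y 1 ys

def is_valid_group (num : List Int) : Bool :=
  match num with
  | [] => false            -- Python A raises IndexError here (num[0]); excluded by Pre_
  | x :: ys => isValidGroupLoop x 1 ys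

-- ===== PORT B =====
-- the 'for a,b,c,d in zip(pad, pad[1:], pad[2:], pad[3:])' loop: the zip of the three
-- shifted copies enumerates exactly the consecutive quadruples of pad, in order, so it is
-- ported as the obvious recursion over consecutive quadruples (same values, same order).
def hasLonelyPair : List (Option Int) → Bool
  | a :: b :: c :: d :: rest =>
      if a ≠ b ∧ b = c ∧ c ≠ d then true
      else hasLonelyPair (b :: c :: d :: rest)
  | _ => false

def is_valid_group_alt (num : List Int) : Bool :=
  hasLonelyPair (none :: num.map some ++ [none])

-- ===== PRECONDITION & SPEC =====
-- Pre_ excludes only the empty list, on which A raises IndexError (num[0]).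
def Pre_is_valid_group (num : List Int) : Prop := num ≠ []
instance (num : List Int) : Decidable (Pre_is_valid_group num) := by unfold Pre_is_valid_group; infer_instance
def pvWitness_is_valid_group : List Int := [1, 1, 2]

def Spec_is_valid_group (num : List Int) (out : Bool) : Prop := out = is_valid_group_alt num
instance (num : List Int) (out : Bool) : Decidable (Spec_is_valid_group num out) := by unfold Spec_is_valid_group; infer_instance

-- ===== CLAIM (what is proved, stated in full; the proofs are below) =====
def Claim_equal_is_valid_group : Prop := ∀ (num : List Int), Dom_is_valid_group num → Pre_is_valid_group num → Spec_is_valid_group num (is_valid_group num)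

-- ===== LEMMAS AND PROOFS =====
-- proof-side characterisation of both programs: the list of maximal run lengths
def countRun (x : Int) : List Int → Int × List Int
  | [] => (0, [])
  | y :: ys => if y = x then let p := countRun x ys; (p.1 + 1, p.2) else (0, y :: ys)

theorem countRun_rest_le (x : Int) (ys : List Int) : (countRun x ys).2.length ≤ ys.length := by
  induction ys with
  | nil => simp [countRun]
  | cons y ys ih =>
    simp only [countRun]
    split
    · exact Nat.le_succ_of_le ih
    · simp

theorem countRun_head_ne (x : Int) (zs : List Int) :
    ∀ (hd : Int) (t : List Int), (countRun x zs).2 = hd :: t → hd ≠ x := by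
  induction zs with
  | nil => intro hd t h'; simp [countRun] at h'
  | cons z zs ih =>
    intro hd t h'
    by_cases hz : z = x
    · simp only [countRun, if_pos hz] at h'; exact ih hd t h'
    · simp only [countRun, if_neg hz] at h'
      obtain ⟨rfl, _⟩ := h'; exact hz

theorem countRun_nonneg (x : Int) (ys : List Int) : 0 ≤ (countRun x ys).1 := by
  induction ys with
  | nil => simp [countRun]
  | cons y ys ih =>
    simp only [countRun]
    split
    · simp; omega
    · simp

def runLengths : List Int → List Int
  | [] => []
  | x :: ys => ((countRun x ys).1 + 1) :: runLengths (countRun x ys).2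
termination_by xs => xs.length
decreasing_by simpa [Nat.lt_succ_iff] using countRun_rest_le x ys

-- A's loop in terms of run lengths
theorem loop_eq (ys : List Int) : ∀ (x k : Int),
    isValidGroupLoop x k ys =
      (decide ((countRun x ys).1 + k = 2) || (runLengths (countRun x ys).2).contains 2) := by
  induction ys with
  | nil => intro x k; simp [isValidGroupLoop, countRun, runLengths]
  | cons y ys ih =>
    intro x k
    by_cases h : y = x
    · simp only [isValidGroupLoop, countRun, if_pos h, ih]
      congr 1
      exact decide_eq_decide.mpr (by omega)
    · simp only [isValidGroupLoop, countRun, if_neg h]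
      by_cases hk : k = 2
      · simp [hk]
      · rw [if_neg hk, ih y 1, runLengths]
        simp [hk, eq_comm]

-- unfolding equations for the quadruple scan
theorem hLP_cons (a b c d : Option Int) (rest : List (Option Int)) :
    hasLonelyPair (a :: b :: c :: d :: rest) =
      if a ≠ b ∧ b = c ∧ c ≠ d then true else hasLonelyPair (b :: c :: d :: rest) := rfl

theorem hLP_short (l : List (Option Int)) (h : l.length ≤ 3) : hasLonelyPair l = false := by
  match l with
  | [] => rfl
  | [a] => rfl
  | [a, b] => rfl
  | [a, b, c] => rfl
  | a :: b :: c :: d :: rest => exact absurd h (by simp)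

-- a window whose first two entries are equal never fires; the scan just moves on
theorem hLP_dup (v : Option Int) (w : List (Option Int)) :
    hasLonelyPair (v :: v :: w) = hasLonelyPair (v :: w) := by
  match w with
  | [] => rfl
  | [c] => rfl
  | c :: d :: rest => rw [hLP_cons, if_neg (by simp)]

-- collapsing a leading run: consecutive equal elements never fire a window
theorem hLP_collapse (zs : List Int) (x : Int) :
    hasLonelyPair (some x :: some x :: zs.map some ++ [none]) =
      hasLonelyPair (some x :: (countRun x zs).2.map some ++ [none]) := by
  induction zs with
  | nil =>
    have h0 : countRun x [] = (0, ([] : List Int)) := rfl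
    rw [h0, hLP_short _ (by simp), hLP_short _ (by simp)]
  | cons z zs ih =>
    by_cases hz : z = x
    · subst hz
      rw [show (some z :: some z :: (z :: zs).map some ++ [none]) =
            some z :: some z :: (some z :: (zs.map some ++ [none])) by simp,
          hLP_dup, show (some z :: some z :: (zs.map some ++ [none])) =
            some z :: some z :: zs.map some ++ [none] by simp]
      simpa [countRun] using ih
    · rw [show (some x :: some x :: (z :: zs).map some ++ [none]) =
            some x :: some x :: (some z :: (zs.map some ++ [none])) by simp,
          hLP_dup]
      simp [countRun, hz]

-- the run-length list of a nonempty list, membership of 2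
theorem contains_runLengths (x : Int) (ys : List Int) :
    ((runLengths (x :: ys)).contains 2) =
      (decide ((countRun x ys).1 = 1) || (runLengths (countRun x ys).2).contains 2) := by
  rw [runLengths]
  by_cases h : (countRun x ys).1 = 1
  · have h2 : (((2:Int)) == ((countRun x ys).1 + 1)) = true := by rw [h]; rfl
    simp [h]
  · have h2 : (((2:Int)) == ((countRun x ys).1 + 1)) = false := by
      simp only [beq_eq_false_iff_ne, ne_eq]; omega
    simp [h]
    intro he
    exact absurd (by omega) h

-- B's scan in terms of run lengths
theorem hLP_main : ∀ (n : Nat) (ys : List Int), ys.length ≤ n → ∀ (x : Int) (p : Option Int), p ≠ some x →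
    hasLonelyPair (p :: some x :: ys.map some ++ [none]) =
      (decide ((countRun x ys).1 = 1) || (runLengths (countRun x ys).2).contains 2) := by
  intro n
  induction n with
  | zero =>
    intro ys hlen x p hp
    have hys : ys = [] := List.eq_nil_of_length_eq_zero (Nat.le_zero.mp hlen)
    subst hys
    simp [hLP_short, countRun, runLengths]
  | succ n ih =>
    intro ys hlen x p hp
    match ys with
    | [] => simp [hLP_short, countRun, runLengths]
    | [y] =>
      by_cases hy : y = x
      · -- run of exactly two, closed by the none sentinel: window fires
        subst hy
        rw [show ((p : Option Int) :: some y :: [y].map some ++ [none]) =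
              p :: some y :: some y :: none :: [] by simp,
            hLP_cons, if_pos ⟨hp, rfl, by simp⟩]
        simp [countRun, runLengths]
      · rw [show ((p : Option Int) :: some x :: [y].map some ++ [none]) =
              p :: some x :: some y :: none :: [] by simp,
            hLP_cons, if_neg (fun hc => hy (Option.some.inj hc.2.1).symm)]
        rw [show ((some x : Option Int) :: some y :: none :: []) =
              some x :: some y :: [].map some ++ [none] by simp]
        rw [ih [] (by simp) y (some x) (by simp [Ne.symm hy])]
        simp [countRun, runLengths, hy]
    | y :: z :: zs =>
      by_cases hy : y = x
      · subst hy
        by_cases hz : z = y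
        · subst hz
          -- window (p, z, z, z) fails on c ≠ d; then collapse the run
          rw [show ((p : Option Int) :: some z :: (z :: z :: zs).map some ++ [none]) =
                p :: some z :: some z :: some z :: (zs.map some ++ [none]) by simp,
              hLP_cons, if_neg (by simp),
              show ((some z : Option Int) :: some z :: some z :: (zs.map some ++ [none])) =
                some z :: some z :: (z :: zs).map some ++ [none] by simp,
              hLP_collapse (z :: zs) z]
          have hcr : countRun z (z :: zs) = ((countRun z zs).1 + 1, (countRun z zs).2) := by
            simp [countRun]
          have hcr2 : countRun z (z :: z :: zs) = ((countRun z zs).1 + 1 + 1, (countRun z zs).2) := by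
            simp [countRun]
          rw [hcr, hcr2]
          match hr : (countRun z zs).2 with
          | [] =>
            rw [hLP_short _ (by simp)]
            have hge := countRun_nonneg z zs
            have hd : (decide ((countRun z zs).1 + 1 + 1 = 1) : Bool) = false := by
              simp only [decide_eq_false_iff_not]; omega
            simp [runLengths]
            omega
          | h :: t =>
            have hne : h ≠ z := countRun_head_ne z zs h t hr
            have htlen : t.length ≤ n := by
              have h1 := countRun_rest_le z zs
              rw [hr] at h1
              simp at hlen h1
              omega
            rw [show ((some z : Option Int) :: (h :: t).map some ++ [none]) =
                  some z :: some h :: t.map some ++ [none] by simp,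
                ih t htlen h (some z) (by simp [Ne.symm hne])]
            rw [contains_runLengths]
            have hge := countRun_nonneg z zs
            rw [show (decide ((countRun z zs).1 + 1 + 1 = 1) : Bool) = false by
                  simp only [decide_eq_false_iff_not]; omega]
            simp
        · -- run of exactly two inside the list: window fires
          rw [show ((p : Option Int) :: some y :: (y :: z :: zs).map some ++ [none]) =
                p :: some y :: some y :: some z :: (zs.map some ++ [none]) by simp,
              hLP_cons, if_pos ⟨hp, rfl, by simp [Ne.symm hz]⟩]
          simp [countRun, hz]
      · -- first two differ: window fails on b = c, shift by one
        rw [show ((p : Option Int) :: some x :: (y :: z :: zs).map some ++ [none]) =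
              p :: some x :: some y :: some z :: (zs.map some ++ [none]) by simp,
            hLP_cons, if_neg (fun hc => hy (Option.some.inj hc.2.1).symm),
            show ((some x : Option Int) :: some y :: some z :: (zs.map some ++ [none])) =
              some x :: some y :: (z :: zs).map some ++ [none] by simp]
        have hlen' : (z :: zs).length ≤ n := by simp at hlen ⊢; omega
        rw [ih (z :: zs) hlen' y (some x) (by simp [Ne.symm hy])]
        rw [show countRun x (y :: z :: zs) = (0, y :: z :: zs) by simp [countRun, hy]]
        rw [contains_runLengths]
        simp

-- ===== VERDICT (by name: the statement is the Claim_ definition above) =====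
theorem is_valid_group_spec : Claim_equal_is_valid_group := by
  intro num _ hpre
  unfold Spec_is_valid_group
  match num, hpre with
  | x :: ys, _ =>
    show isValidGroupLoop x 1 ys = is_valid_group_alt (x :: ys)
    rw [loop_eq, is_valid_group_alt]
    simp only [List.map_cons]
    rw [hLP_main ys.length ys le_rfl x none (by simp)]
    congr 1
    exact (decide_eq_decide.mpr (by omega)).symm
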